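-- pv_equiv track=rewrite | github.com/genetrydash/geometry_dash_advance | export_levels_chunks.py | chunkify_to_1d
-- ===== SOURCE A (Python) =====
-- def chunkify_to_1d(level_array, chunk_size=16):
--     """Splits the level array into 16x16 chunks stored in a 1D list."""
--     height = len(level_array)
--     width = len(level_array[0])
--
--     chunks = []
--
--     # Number of chunks horizontally and vertically
--     num_horizontal_chunks = (width + chunk_size - 1) // chunk_size
--     num_vertical_chunks = (height + chunk_size - 1) // chunk_size
--
--     for v_chunk in range(num_vertical_chunks):
--         for h_chunk in range(num_horizontal_chunks):
--             # Extract a single 16x16 chunk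
--             chunk = [
--                 level_array[row][h_chunk * chunk_size:(h_chunk + 1) * chunk_size]
--                 for row in range(v_chunk * chunk_size, min((v_chunk + 1) * chunk_size, height))
--             ]
--             # Pad chunk to 16x16 if necessary
--             while len(chunk) < chunk_size:
--                 chunk.append(['0'] * chunk_size)  # Pad with zeros
--             for row in chunk:
--                 while len(row) < chunk_size:
--                     row.append('0')  # Pad row with zeros
--             chunks.append(chunk)
--
--     return chunks
-- ===== SOURCE B (Python) =====
-- def chunkify_to_1d(level_array, chunk_size=16):
--     """Splits the level array into 16x16 chunks stored in a 1D list."""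
--     height = len(level_array)
--     width = len(level_array[0])
--     num_horizontal_chunks = (width + chunk_size - 1) // chunk_size
--     num_vertical_chunks = (height + chunk_size - 1) // chunk_size
--     return [
--         [[level_array[v * chunk_size + i][h * chunk_size + j]
--           if v * chunk_size + i < height
--              and h * chunk_size + j < len(level_array[v * chunk_size + i])
--           else '0'
--           for j in range(chunk_size)]
--          for i in range(chunk_size)]
--         for v in range(num_vertical_chunks)
--         for h in range(num_horizontal_chunks)
--     ]
-- ===== Notes on version B (the rewrite author's own statement) =====
-- stated objective: simpler
-- what changed: Each padded chunk is produced directly by one nested comprehension that computes every cell from its global coordinates with an in-bounds test, replacing A's slice-extract followed by two while-loop padding passes over a mutated chunk list.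
import Mathlib
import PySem

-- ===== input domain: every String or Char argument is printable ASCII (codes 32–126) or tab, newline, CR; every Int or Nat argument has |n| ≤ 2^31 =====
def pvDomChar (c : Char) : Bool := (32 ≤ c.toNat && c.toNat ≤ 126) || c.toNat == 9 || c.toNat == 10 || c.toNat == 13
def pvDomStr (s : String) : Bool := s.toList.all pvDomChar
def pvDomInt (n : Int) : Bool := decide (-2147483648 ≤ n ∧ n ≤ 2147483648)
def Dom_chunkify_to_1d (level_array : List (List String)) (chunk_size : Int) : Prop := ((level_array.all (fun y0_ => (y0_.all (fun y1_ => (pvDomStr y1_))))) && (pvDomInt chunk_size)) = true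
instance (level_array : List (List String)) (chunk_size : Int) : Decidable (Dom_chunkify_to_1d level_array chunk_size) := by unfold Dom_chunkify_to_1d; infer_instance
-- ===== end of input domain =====

-- B builds each padded chunk directly by a nested comprehension computing every cell from
-- its global coordinates, instead of A's slice-extract then two while-loop padding passes
-- (simpler decomposition, same cost). Return values only; neither program mutates its argument.

-- ===== PORT A =====
-- 'while len(l) < chunk_size: l.append(pad)' (A uses this shape twice: chunk rows and row cells)
def pvPadA {α : Type} (cs : Int) (pad : α) (l : List α) : List α :=
  if (l.length : Int) < cs then pvPadA cs pad (l ++ [pad]) else l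
  termination_by (cs - l.length).toNat
  decreasing_by simp only [List.length_append, List.length_cons, List.length_nil]; omega

-- body of A's double loop: extract one chunk by row slices, then pad it to chunk_size x chunk_size
def pvChunkA (la : List (List String)) (cs height v h : Int) : List (List String) :=
  let chunk := (PySem.List.pyRange (v * cs) (min ((v + 1) * cs) height) 1).map
      (fun row => PySem.List.slice ((PySem.List.pyGet? la row).getD []) (some (h * cs)) (some ((h + 1) * cs)))
  let chunk := pvPadA cs (List.replicate cs.toNat "0") chunk
  chunk.map (fun row => pvPadA cs "0" row)

def chunkify_to_1d (level_array : List (List String)) (chunk_size : Int) : List (List (List String)) :=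
  let height : Int := level_array.length
  -- level_array[0]: Pre_ excludes the empty list, where Python raises IndexError
  let width : Int := ((PySem.List.pyGet? level_array 0).getD []).length
  let numH : Int := PySem.Int.floordiv (width + chunk_size - 1) chunk_size
  let numV : Int := PySem.Int.floordiv (height + chunk_size - 1) chunk_size
  (PySem.List.pyRange 0 numV 1).foldl (fun chunks v =>
    (PySem.List.pyRange 0 numH 1).foldl (fun chunks h =>
      chunks ++ [pvChunkA level_array chunk_size height v h]) chunks) []

-- ===== PORT B =====
-- one cell: level_array[r][c] if r, c are in bounds, else '0'
def pvCellB (la : List (List String)) (height r c : Int) : String :=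
  if r < height ∧ c < ((((PySem.List.pyGet? la r).getD []).length : Int)) then
    (PySem.List.pyGet? ((PySem.List.pyGet? la r).getD []) c).getD "0"
  else "0"

-- one chunk: nested comprehension over local coordinates
def pvChunkB (la : List (List String)) (cs height v h : Int) : List (List String) :=
  (PySem.List.pyRange 0 cs 1).map (fun i =>
    (PySem.List.pyRange 0 cs 1).map (fun j =>
      pvCellB la height (v * cs + i) (h * cs + j)))

def chunkify_to_1d_alt (level_array : List (List String)) (chunk_size : Int) : List (List (List String)) :=
  let height : Int := level_array.length
  let width : Int := ((PySem.List.pyGet? level_array 0).getD []).length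
  let numH : Int := PySem.Int.floordiv (width + chunk_size - 1) chunk_size
  let numV : Int := PySem.Int.floordiv (height + chunk_size - 1) chunk_size
  (PySem.List.pyRange 0 numV 1).flatMap (fun v =>
    (PySem.List.pyRange 0 numH 1).map (fun h =>
      pvChunkB level_array chunk_size height v h))

-- ===== PRECONDITION & SPEC =====
-- Pre_ excludes exactly the inputs where Python A raises: the empty level_array
-- (IndexError on level_array[0]) and chunk_size = 0 (ZeroDivisionError).
def Pre_chunkify_to_1d (level_array : List (List String)) (chunk_size : Int) : Prop :=
  level_array ≠ [] ∧ chunk_size ≠ 0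
instance (level_array : List (List String)) (chunk_size : Int) : Decidable (Pre_chunkify_to_1d level_array chunk_size) := by unfold Pre_chunkify_to_1d; infer_instance
def pvWitness_chunkify_to_1d : List (List String) × Int := ([["1", "2", "3"], ["4", "5", "6"]], 2)

def Spec_chunkify_to_1d (level_array : List (List String)) (chunk_size : Int) (out : List (List (List String))) : Prop := out = chunkify_to_1d_alt level_array chunk_size
instance (level_array : List (List String)) (chunk_size : Int) (out : List (List (List String))) : Decidable (Spec_chunkify_to_1d level_array chunk_size out) := by unfold Spec_chunkify_to_1d; infer_instance

-- ===== CLAIM (what is proved, stated in full; the proofs are below) =====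
def Claim_equal_chunkify_to_1d : Prop := ∀ (level_array : List (List String)) (chunk_size : Int), Dom_chunkify_to_1d level_array chunk_size → Pre_chunkify_to_1d level_array chunk_size → Spec_chunkify_to_1d level_array chunk_size (chunkify_to_1d level_array chunk_size)

-- ===== LEMMAS AND PROOFS =====

-- closed form of the while-padding loop
theorem pvPadA_eq {α : Type} (cs : Int) (pad : α) (l : List α) :
    pvPadA cs pad l = l ++ List.replicate (cs - l.length).toNat pad := by
  fun_induction pvPadA cs pad l with
  | case1 l hlt ih =>
      rw [ih]
      simp only [List.append_assoc, List.length_append, List.length_cons, List.length_nil,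
        List.singleton_append]
      rw [← List.replicate_succ]
      congr 2
      omega
  | case2 l hge =>
      have h0 : (cs - (l.length : Int)).toNat = 0 := by omega
      simp [h0]

-- one chunk of A equals one chunk of B, stated with generalized offsets lo = v*cs, a0 = h*cs
theorem chunk_eq_gen (la : List (List String)) (cs lo a0 : Int)
    (hlo : 0 < cs → 0 ≤ lo) (ha0 : 0 < cs → 0 ≤ a0) :
    (pvPadA cs (List.replicate cs.toNat "0")
        ((PySem.List.pyRange lo (min (lo + cs) (la.length : Int)) 1).map
          (fun row => PySem.List.slice ((PySem.List.pyGet? la row).getD []) (some a0) (some (a0 + cs))))).map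
        (fun row => pvPadA cs "0" row)
      = (PySem.List.pyRange 0 cs 1).map (fun i =>
          (PySem.List.pyRange 0 cs 1).map (fun j =>
            pvCellB la (la.length : Int) (lo + i) (a0 + j))) := by
  rcases le_or_gt cs 0 with hcs | hcs
  · -- cs ≤ 0: both sides are []
    have he1 : PySem.List.pyRange lo (min (lo + cs) (la.length : Int)) 1 = [] :=
      PySem.List.pyRange_one_eq_nil (by omega)
    have he2 : PySem.List.pyRange 0 cs 1 = [] := PySem.List.pyRange_one_eq_nil (by omega)
    rw [he1, he2, List.map_nil, pvPadA_eq]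
    have h0 : (cs - (([] : List (List String)).length : Int)).toNat = 0 := by
      simp
      omega
    rw [h0]
    simp
  · -- cs > 0
    have hlo' : 0 ≤ lo := hlo hcs
    have ha0' : 0 ≤ a0 := ha0 hcs
    set height : Int := (la.length : Int) with hheight
    have hhnn : 0 ≤ height := by positivity
    set hi : Int := min (lo + cs) height with hhi
    rw [pvPadA_eq]
    apply List.ext_getElem
    · simp [PySem.List.length_pyRange_one]
      omega
    · intro i hi1 hi2
      simp only [List.length_map, List.length_append, List.length_replicate,
        PySem.List.length_pyRange_one] at hi1 hi2
      rw [List.getElem_map, List.getElem_map, PySem.List.getElem_pyRange_one]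
      simp only [zero_add]
      have hmlen : ((PySem.List.pyRange lo hi 1).map
          (fun row => PySem.List.slice ((PySem.List.pyGet? la row).getD []) (some a0) (some (a0 + cs)))).length
          = (hi - lo).toNat := by
        simp [PySem.List.length_pyRange_one]
      by_cases hcase : i < (hi - lo).toNat
      · -- real row: slice then pad = cell formula
        rw [List.getElem_append_left (by rw [hmlen]; exact hcase)]
        rw [List.getElem_map, PySem.List.getElem_pyRange_one]
        have hrlt : lo + (i : Int) < height := by omega
        have hrge : (0 : Int) ≤ lo + (i : Int) := by omega
        have hget : PySem.List.pyGet? la (lo + (i : Int)) = some la[(lo + (i : Int)).toNat] :=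
          PySem.List.pyGet?_eq_some_getElem la hrge (by omega)
        rw [hget]
        simp only [Option.getD_some]
        set row : List String := la[(lo + (i : Int)).toNat] with hrow
        rw [PySem.List.slice_toNat row ha0' (by omega)]
        have hba : (a0 + cs).toNat - a0.toNat = cs.toNat := by omega
        rw [hba, pvPadA_eq]
        set s : List String := (row.drop a0.toNat).take cs.toNat with hs
        have hslen : s.length = min cs.toNat (row.length - a0.toNat) := by
          simp [hs]
        apply List.ext_getElem
        · simp [PySem.List.length_pyRange_one, hslen]
          omega
        · intro j hj1 hj2
          simp only [List.length_append, List.length_replicate, hslen] at hj1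
          rw [List.getElem_map, PySem.List.getElem_pyRange_one]
          simp only [zero_add]
          unfold pvCellB
          rw [hget]
          simp only [Option.getD_some]
          by_cases hcj : j < s.length
          · rw [List.getElem_append_left hcj]
            have hcbound : a0 + (j : Int) < (row.length : Int) := by
              rw [hslen] at hcj; omega
            rw [if_pos ⟨by omega, hcbound⟩]
            have hgc : PySem.List.pyGet? row (a0 + (j : Int)) = some row[(a0 + (j : Int)).toNat] :=
              PySem.List.pyGet?_eq_some_getElem row (by omega) (by omega)
            rw [hgc]
            simp only [Option.getD_some, hs]
            rw [List.getElem_take, List.getElem_drop]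
            congr 1
            omega
          · rw [List.getElem_append_right (by omega)]
            have hcge : ¬ (a0 + (j : Int) < (row.length : Int)) := by
              rw [hslen] at hcj; omega
            rw [if_neg (by intro hcon; exact hcge hcon.2)]
            simp
      · -- padding row: all '0' on both sides
        rw [List.getElem_append_right (by rw [hmlen]; omega)]
        simp only [List.getElem_replicate]
        have hrge2 : ¬ (lo + (i : Int) < height) := by omega
        have hb : ∀ j ∈ PySem.List.pyRange 0 cs 1,
            pvCellB la height (lo + (i : Int)) (a0 + j) = "0" := by
          intro j hj
          unfold pvCellB
          rw [if_neg (by intro hcon; exact hrge2 hcon.1)]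
        rw [List.map_congr_left hb, pvPadA_eq]
        have h0 : (cs - ((List.replicate cs.toNat "0").length : Int)).toNat = 0 := by
          rw [List.length_replicate]
          omega
        rw [h0]
        simp only [List.replicate_zero, List.append_nil]
        rw [List.map_const', PySem.List.length_pyRange_one]
        congr 1
        omega

theorem chunk_eq (la : List (List String)) (cs v h : Int) (hv : 0 ≤ v) (hh : 0 ≤ h) :
    pvChunkA la cs (la.length : Int) v h = pvChunkB la cs (la.length : Int) v h := by
  unfold pvChunkA pvChunkB
  have h1 : (v + 1) * cs = v * cs + cs := by ring
  have h3 : (h + 1) * cs = h * cs + cs := by ring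
  rw [h1, h3]
  exact chunk_eq_gen la cs (v * cs) (h * cs)
    (fun hcs => mul_nonneg hv hcs.le) (fun hcs => mul_nonneg hh hcs.le)

-- A's nested foldl-append loop is B's flatMap/map comprehension
theorem nested_fold (lv lh : List Int) (f : Int → Int → List (List String)) :
    lv.foldl (fun acc v => lh.foldl (fun acc h => acc ++ [f v h]) acc) ([] : List (List (List String)))
      = lv.flatMap (fun v => lh.map (f v)) := by
  refine (PySem.List.foldl_congr_mem lv _ (fun acc v => acc ++ lh.map (f v)) []
    (fun acc v _ => PySem.List.foldl_append_singleton_eq_map _ _ _)).trans ?_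
  rw [PySem.List.foldl_append_eq_flatMap]
  simp

-- ===== VERDICT (by name: the statement is the Claim_ definition above) =====
theorem chunkify_to_1d_spec : Claim_equal_chunkify_to_1d := by
  intro la cs _ _
  show chunkify_to_1d la cs = chunkify_to_1d_alt la cs
  unfold chunkify_to_1d chunkify_to_1d_alt
  rw [nested_fold]
  apply List.flatMap_congr
  intro v hv
  apply List.map_congr_left
  intro h hh
  exact chunk_eq la cs v h (PySem.List.mem_pyRange_one.mp hv).1 (PySem.List.mem_pyRange_one.mp hh).1
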